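-- pv_equiv track=rewrite | github.com/sanjithvenugopal/db-migration-validator | src/db_migration_validator/validators/routine.py | _validate_object
-- ===== SOURCE A (Python) =====
-- from typing import List, Dict
--
-- def _validate_object(
--     source_objects: List[str],
--     target_objects: List[str],
--     object_type: str
-- ) -> List[Dict]:
--     """
--     Generic routine validation logic.
--
--     Args:
--         source_objects (List[str]): Objects from source DB
--         target_objects (List[str]): Objects from target DB
--         object_type (str): PROCEDURE / FUNCTION / TRIGGER
--
--     Returns:
--         List[dict]: Validation results
--     """
--     results = []
--
--     # Normalize object names to uppercase
--     source_set = {obj.upper() for obj in source_objects}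
--     target_set = {obj.upper() for obj in target_objects}
--
--     # Union of all objects
--     all_objects = sorted(source_set | target_set)
--
--     for obj in all_objects:
--         if obj in source_set and obj in target_set:
--             status = "MATCH"
--             source_value = "PRESENT"
--             target_value = "PRESENT"
--         elif obj in source_set:
--             status = "MISMATCH"
--             source_value = "PRESENT"
--             target_value = "MISSING"
--         else:
--             status = "MISMATCH"
--             source_value = "MISSING"
--             target_value = "PRESENT"
--
--         results.append({
--             "object_type": object_type,
--             "object_name": obj,
--             "source_value": source_value,
--             "target_value": target_value,
--             "status": status
--         })
--
--     return results
-- ===== SOURCE B (Python) =====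
-- from typing import List, Dict
--
-- def _validate_object(
--     source_objects: List[str],
--     target_objects: List[str],
--     object_type: str
-- ) -> List[Dict]:
--     source_set = {obj.upper() for obj in source_objects}
--     target_set = {obj.upper() for obj in target_objects}
--
--     def rec(name, status, source_value, target_value):
--         return {
--             "object_type": object_type,
--             "object_name": name,
--             "source_value": source_value,
--             "target_value": target_value,
--             "status": status,
--         }
--
--     results = (
--         [rec(n, "MATCH", "PRESENT", "PRESENT") for n in source_set & target_set]
--         + [rec(n, "MISMATCH", "PRESENT", "MISSING") for n in source_set - target_set]
--         + [rec(n, "MISMATCH", "MISSING", "PRESENT") for n in target_set - source_set]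
--     )
--     return sorted(results, key=lambda r: r["object_name"])
-- ===== Notes on version B (the rewrite author's own statement) =====
-- stated objective: alternative
-- what changed: Replaces the sorted-union loop with per-name membership branching by three up-front set-algebra partitions (intersection and both differences), builds each group's records in bulk, and sorts the concatenated records by object_name at the end.
import Mathlib
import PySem

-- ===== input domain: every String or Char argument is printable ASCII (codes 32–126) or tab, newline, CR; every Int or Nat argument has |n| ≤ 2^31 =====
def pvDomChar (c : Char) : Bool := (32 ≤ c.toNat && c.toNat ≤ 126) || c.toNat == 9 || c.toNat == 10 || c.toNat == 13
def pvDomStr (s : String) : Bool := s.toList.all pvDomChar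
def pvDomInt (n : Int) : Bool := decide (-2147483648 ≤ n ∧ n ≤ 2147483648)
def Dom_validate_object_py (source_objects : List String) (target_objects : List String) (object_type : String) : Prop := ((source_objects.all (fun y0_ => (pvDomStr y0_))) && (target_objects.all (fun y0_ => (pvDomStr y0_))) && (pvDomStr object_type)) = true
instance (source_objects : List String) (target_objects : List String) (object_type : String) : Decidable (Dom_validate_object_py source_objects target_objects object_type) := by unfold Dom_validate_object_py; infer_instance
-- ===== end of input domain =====

-- B replaces A's sorted-union loop (per-name membership branching) by three up-front
-- set-algebra partitions whose records are built in bulk and sorted once at the end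
-- (objective: alternative decomposition, same asymptotic cost).

-- ===== PORT A =====
def validate_object_py (source_objects : List String) (target_objects : List String) (object_type : String) : List (List (String × String)) :=
  let source_set : PySem.Set String := PySem.Set.ofList (source_objects.map PySem.Str.upper)
  let target_set : PySem.Set String := PySem.Set.ofList (target_objects.map PySem.Str.upper)
  let all_objects := PySem.List.sorted (PySem.Set.union source_set target_set) (fun x => x) false
  all_objects.foldl (fun results obj =>
    let stv :=
      if PySem.Set.contains source_set obj && PySem.Set.contains target_set obj then
        ("MATCH", "PRESENT", "PRESENT")
      else if PySem.Set.contains source_set obj then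
        ("MISMATCH", "PRESENT", "MISSING")
      else
        ("MISMATCH", "MISSING", "PRESENT")
    results ++ [[("object_type", object_type), ("object_name", obj),
                 ("source_value", stv.2.1), ("target_value", stv.2.2), ("status", stv.1)]]) []

-- ===== PORT B =====
-- B-side helper: the record dict (distinct literal keys, insertion order)
def vrec (object_type name status source_value target_value : String) : List (String × String) :=
  [("object_type", object_type), ("object_name", name),
   ("source_value", source_value), ("target_value", target_value), ("status", status)]

def validate_object_py_alt (source_objects : List String) (target_objects : List String) (object_type : String) : List (List (String × String)) :=
  let source_set : PySem.Set String := PySem.Set.ofList (source_objects.map PySem.Str.upper)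
  let target_set : PySem.Set String := PySem.Set.ofList (target_objects.map PySem.Str.upper)
  let results :=
    (PySem.Set.inter source_set target_set).map (fun n => vrec object_type n "MATCH" "PRESENT" "PRESENT")
    ++ (PySem.Set.diff source_set target_set).map (fun n => vrec object_type n "MISMATCH" "PRESENT" "MISSING")
    ++ (PySem.Set.diff target_set source_set).map (fun n => vrec object_type n "MISMATCH" "MISSING" "PRESENT")
  PySem.List.sorted results (fun r => PySem.Dict.getD ⟨r⟩ "object_name" "") false

-- ===== PRECONDITION & SPEC =====
def Spec_validate_object_py (source_objects : List String) (target_objects : List String) (object_type : String) (out : List (List (String × String))) : Prop := out = validate_object_py_alt source_objects target_objects object_type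
instance (source_objects : List String) (target_objects : List String) (object_type : String) (out : List (List (String × String))) : Decidable (Spec_validate_object_py source_objects target_objects object_type out) := by unfold Spec_validate_object_py; infer_instance

-- ===== CLAIM (what is proved, stated in full; the proofs are below) =====
def Claim_equal_validate_object_py : Prop := ∀ (source_objects : List String) (target_objects : List String) (object_type : String), Dom_validate_object_py source_objects target_objects object_type → Spec_validate_object_py source_objects target_objects object_type (validate_object_py source_objects target_objects object_type)

-- ===== LEMMAS AND PROOFS =====

-- the record A builds for a name, as a function of the two normalized sets
def recA (ss ts : PySem.Set String) (ot obj : String) : List (String × String) :=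
  if PySem.Set.contains ss obj && PySem.Set.contains ts obj then
    vrec ot obj "MATCH" "PRESENT" "PRESENT"
  else if PySem.Set.contains ss obj then
    vrec ot obj "MISMATCH" "PRESENT" "MISSING"
  else
    vrec ot obj "MISMATCH" "MISSING" "PRESENT"

theorem key_vrec (ot n s sv tv : String) :
    PySem.Dict.getD ⟨vrec ot n s sv tv⟩ "object_name" "" = n := by
  simp [vrec, PySem.Dict.getD, PySem.Dict.get?]

theorem key_recA (ss ts : PySem.Set String) (ot n : String) :
    PySem.Dict.getD ⟨recA ss ts ot n⟩ "object_name" "" = n := by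
  unfold recA; split_ifs <;> exact key_vrec ..

theorem validate_eq (source_objects target_objects : List String) (object_type : String) :
    validate_object_py source_objects target_objects object_type
      = validate_object_py_alt source_objects target_objects object_type := by
  set ss : PySem.Set String := PySem.Set.ofList (source_objects.map PySem.Str.upper) with hss
  set ts : PySem.Set String := PySem.Set.ofList (target_objects.map PySem.Str.upper) with hts
  have hssn : ss.Nodup := PySem.Set.nodup_ofList _
  have htsn : ts.Nodup := PySem.Set.nodup_ofList _
  set U := PySem.List.sorted (PySem.Set.union ss ts) (fun x => x) false with hU
  -- A is the map of recA over the sorted union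
  have hA : validate_object_py source_objects target_objects object_type
      = U.map (recA ss ts object_type) := by
    simp only [validate_object_py, ← hss, ← hts, ← hU]
    rw [PySem.List.foldl_append_singleton_eq_map]
    simp only [List.nil_append]
    apply List.map_congr_left
    intro obj _
    unfold recA vrec
    split_ifs <;> rfl
  -- the three groups partition the union
  have hnd3 : (PySem.Set.inter ss ts ++ PySem.Set.diff ss ts ++ PySem.Set.diff ts ss).Nodup := by
    rw [List.nodup_append, List.nodup_append]
    refine ⟨⟨PySem.Set.nodup_inter _ _ hssn, PySem.Set.nodup_diff _ _ hssn, ?_⟩,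
      PySem.Set.nodup_diff _ _ htsn, ?_⟩
    · intro x hx y hy heq
      subst heq
      exact ((PySem.Set.mem_diff ss ts x).mp hy).2 ((PySem.Set.mem_inter ss ts x).mp hx).2
    · intro x hx y hy heq
      subst heq
      refine ((PySem.Set.mem_diff ts ss x).mp hy).2 ?_
      rcases List.mem_append.mp hx with h | h
      · exact ((PySem.Set.mem_inter ss ts x).mp h).1
      · exact ((PySem.Set.mem_diff ss ts x).mp h).1
  have hperm_names : (PySem.Set.union ss ts).Perm
      (PySem.Set.inter ss ts ++ PySem.Set.diff ss ts ++ PySem.Set.diff ts ss) := by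
    rw [List.perm_ext_iff_of_nodup (PySem.Set.nodup_union _ _ hssn) hnd3]
    intro x
    simp only [List.mem_append, PySem.Set.mem_union, PySem.Set.mem_inter, PySem.Set.mem_diff]
    by_cases hxs : x ∈ ss <;> by_cases hxt : x ∈ ts <;> simp [hxs, hxt]
  -- mapping recA over the partition yields B's three bulk groups
  have hmapeq : (PySem.Set.inter ss ts ++ PySem.Set.diff ss ts ++ PySem.Set.diff ts ss).map
        (recA ss ts object_type)
      = (PySem.Set.inter ss ts).map (fun n => vrec object_type n "MATCH" "PRESENT" "PRESENT")
        ++ (PySem.Set.diff ss ts).map (fun n => vrec object_type n "MISMATCH" "PRESENT" "MISSING")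
        ++ (PySem.Set.diff ts ss).map (fun n => vrec object_type n "MISMATCH" "MISSING" "PRESENT") := by
    simp only [List.map_append]
    refine congrArg₂ _ (congrArg₂ _ ?_ ?_) ?_
    · apply List.map_congr_left; intro n hn
      obtain ⟨h1, h2⟩ := (PySem.Set.mem_inter ss ts n).mp hn
      simp [recA, h1, h2]
    · apply List.map_congr_left; intro n hn
      obtain ⟨h1, h2⟩ := (PySem.Set.mem_diff ss ts n).mp hn
      simp [recA, h1, h2]
    · apply List.map_congr_left; intro n hn
      obtain ⟨h1, h2⟩ := (PySem.Set.mem_diff ts ss n).mp hn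
      simp [recA, h2]
  -- A's output is key-strictly-increasing
  have hUnd : U.Nodup :=
    ((PySem.List.sorted_perm (PySem.Set.union ss ts) (fun x => x) false).nodup_iff).mpr
      (PySem.Set.nodup_union _ _ hssn)
  have hUlt : U.Pairwise (· < ·) :=
    ((PySem.List.sorted_pairwise (PySem.Set.union ss ts) (fun x => x)).and hUnd).imp
      (fun h => lt_of_le_of_ne h.1 h.2)
  have hpw : (U.map (recA ss ts object_type)).Pairwise
      (fun a b => PySem.Dict.getD ⟨a⟩ "object_name" ""
        < PySem.Dict.getD (⟨b⟩ : PySem.Dict String String) "object_name" "") := by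
    rw [List.pairwise_map]
    exact hUlt.imp (fun {a b} h => by rw [key_recA, key_recA]; exact h)
  have hperm : (U.map (recA ss ts object_type)).Perm
      ((PySem.Set.inter ss ts).map (fun n => vrec object_type n "MATCH" "PRESENT" "PRESENT")
        ++ (PySem.Set.diff ss ts).map (fun n => vrec object_type n "MISMATCH" "PRESENT" "MISSING")
        ++ (PySem.Set.diff ts ss).map (fun n => vrec object_type n "MISMATCH" "MISSING" "PRESENT")) := by
    rw [← hmapeq]
    exact ((PySem.List.sorted_perm (PySem.Set.union ss ts) (fun x => x) false).trans
      hperm_names).map _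
  have hB := PySem.List.sorted_eq_of_perm_of_pairwise_lt _ _
    (fun r => PySem.Dict.getD ⟨r⟩ "object_name" "") hperm hpw
  simp only [validate_object_py_alt, ← hss, ← hts]
  rw [hB, hA]

-- ===== VERDICT (by name: the statement is the Claim_ definition above) =====
theorem validate_object_py_spec : Claim_equal_validate_object_py := by
  intro s t ot _
  exact validate_eq s t ot
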